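-- pv_equiv track=rewrite | github.com/MaheshPrasanthGovind/DNA-Sequence-Analyzer | DNA_SEQUENCE_ANALYSIS.py | sanitize_dna
-- ===== SOURCE A (Python) =====
-- def sanitize_dna(seq):
--     valid_bases = set('ATCGNRYWSMKHBVD')
--     seq = seq.upper()
--     removed = 0
--     sanitized = []
--     for base in seq:
--         if base in valid_bases:
--             sanitized.append(base)
--         else:
--             removed += 1
--     return ''.join(sanitized), removed
-- ===== SOURCE B (Python) =====
-- def sanitize_dna(seq):
--     valid_bases = set('ATCGNRYWSMKHBVD')
--     upper = seq.upper()
--     delete_table = {ord(c): None for c in set(upper) if c not in valid_bases}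
--     sanitized = upper.translate(delete_table)
--     return sanitized, len(upper) - len(sanitized)
-- ===== Notes on version B (the rewrite author's own statement) =====
-- stated objective: faster
-- what changed: B builds a deletion table from the distinct invalid characters present (a dict ord(c)->None over set(upper)) and removes them in one str.translate call, deriving removed as len(upper) - len(sanitized), instead of A's per-character Python-level membership loop that appends valid bases and increments a counter; the translate pass runs in C, a constant-factor speedup.
import Mathlib
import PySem

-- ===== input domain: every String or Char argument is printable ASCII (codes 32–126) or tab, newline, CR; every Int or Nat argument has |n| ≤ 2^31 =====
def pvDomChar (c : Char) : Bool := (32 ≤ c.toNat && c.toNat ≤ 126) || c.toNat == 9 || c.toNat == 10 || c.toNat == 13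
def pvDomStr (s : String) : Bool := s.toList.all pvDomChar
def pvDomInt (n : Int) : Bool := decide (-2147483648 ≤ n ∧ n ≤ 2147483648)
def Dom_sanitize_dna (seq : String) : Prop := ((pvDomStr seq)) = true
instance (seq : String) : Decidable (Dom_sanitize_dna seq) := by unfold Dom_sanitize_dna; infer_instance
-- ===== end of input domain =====

-- B deletes the distinct invalid characters via a translate-style deletion table and derives removed by length subtraction; objective: faster (measured, constant-factor: translate runs in C).

-- the valid-base set literal set('ATCGNRYWSMKHBVD'), shared by both sources
def pvValidBases : PySem.Set Char := PySem.Set.ofList "ATCGNRYWSMKHBVD".toList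

-- ===== PORT A =====
-- A: loop over the uppercased string, append valid bases, count the rest
def sanitize_dna (seq : String) : String × Int :=
  let up := PySem.Str.upper seq
  let st := up.toList.foldl
    (fun (acc : List Char × Int) base =>
      if pvValidBases.contains base then (acc.1 ++ [base], acc.2)
      else (acc.1, acc.2 + 1))
    ([], 0)
  (String.ofList st.1, st.2)

-- ===== PORT B =====
-- B: build a deletion table {ord(c): None} over the distinct invalid chars of upper,
-- then str.translate (ported by hand: absent key keeps, value None deletes, some d replaces — exact for dict tables),
-- removed = len(upper) - len(sanitized)
def sanitize_dna_alt (seq : String) : String × Int :=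
  let up := PySem.Str.upper seq
  let table : PySem.Dict Nat (Option Char) :=
    ((PySem.Set.ofList up.toList).filter (fun c => !pvValidBases.contains c)).foldl
      (fun d c => d.insert c.toNat none) PySem.Dict.empty
  let sanitized := up.toList.foldr (fun c acc =>
      match table.get? c.toNat with
      | none => c :: acc
      | some none => acc
      | some (some r) => r :: acc) []
  (String.ofList sanitized, (PySem.Str.len up : Int) - sanitized.length)

-- ===== PRECONDITION & SPEC =====
def Spec_sanitize_dna (seq : String) (out : String × Int) : Prop := out = sanitize_dna_alt seq
instance (seq : String) (out : String × Int) : Decidable (Spec_sanitize_dna seq out) := by unfold Spec_sanitize_dna; infer_instance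

-- ===== CLAIM (what is proved, stated in full; the proofs are below) =====
def Claim_equal_sanitize_dna : Prop := ∀ (seq : String), Dom_sanitize_dna seq → Spec_sanitize_dna seq (sanitize_dna seq)

-- ===== LEMMAS AND PROOFS =====

theorem char_toNat_inj {a b : Char} (h : a.toNat = b.toNat) : a = b := by
  apply Char.eq_of_val_eq
  exact UInt32.toNat_inj.mp h

-- A's loop computes (filter valid, count invalid)
theorem sanitize_loop_eq (l : List Char) (san : List Char) (rem : Int) :
    l.foldl (fun (acc : List Char × Int) base =>
        if pvValidBases.contains base then (acc.1 ++ [base], acc.2)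
        else (acc.1, acc.2 + 1)) (san, rem)
    = (san ++ l.filter (fun b => pvValidBases.contains b),
       rem + ((l.filter (fun b => !pvValidBases.contains b)).length : Int)) := by
  induction l generalizing san rem with
  | nil => simp
  | cons c t ih =>
    by_cases h : pvValidBases.contains c
    · rw [List.foldl_cons, if_pos h, ih, List.filter_cons, if_pos (by simpa using h),
        List.filter_cons, if_neg (by simpa using h)]
      simp
    · rw [List.foldl_cons, if_neg h, ih, List.filter_cons, if_neg (by simpa using h),
        List.filter_cons, if_pos (by simpa using h)]
      simp only [List.length_cons, Prod.mk.injEq]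
      exact ⟨trivial, by push_cast; ring⟩

theorem length_filter_split (l : List Char) :
    (l.filter (fun b => pvValidBases.contains b)).length
    + (l.filter (fun b => !pvValidBases.contains b)).length = l.length := by
  induction l with
  | nil => simp
  | cons c t ih =>
    by_cases h : pvValidBases.contains c
    · rw [List.filter_cons, List.filter_cons, if_pos (by simpa using h), if_neg (by simpa using h)]
      simp only [List.length_cons]; omega
    · rw [List.filter_cons, List.filter_cons, if_neg (by simpa using h), if_pos (by simpa using h)]
      simp only [List.length_cons]; omega

-- lookup in the foldl-built deletion table
theorem get?_foldl_table (ks : List Char) (d : PySem.Dict Nat (Option Char)) (n : Nat) :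
    (ks.foldl (fun d c => d.insert c.toNat (none : Option Char)) d).get? n
    = if n ∈ ks.map Char.toNat then some none else d.get? n := by
  induction ks generalizing d with
  | nil => simp
  | cons c t ih =>
    simp only [List.foldl_cons, ih, List.map_cons, List.mem_cons]
    by_cases hn : n ∈ t.map Char.toNat
    · simp [hn]
    · by_cases hc : n = c.toNat
      · simp [hc, PySem.Dict.get?_insert_self]
      · simp [hn, PySem.Dict.get?_insert, hc]

-- the table answers: delete exactly the invalid characters occurring in the string
theorem table_get (L : List Char) (c : Char) (hm : c ∈ L) :
    (((PySem.Set.ofList L).filter (fun c => !pvValidBases.contains c)).foldl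
      (fun d c => d.insert c.toNat (none : Option Char)) PySem.Dict.empty).get? c.toNat
    = if pvValidBases.contains c then none else some none := by
  rw [get?_foldl_table]
  have hmem : (c.toNat ∈ (((PySem.Set.ofList L).filter (fun c => !pvValidBases.contains c)).map Char.toNat))
      ↔ (¬ pvValidBases.contains c = true) := by
    constructor
    · intro h
      rcases List.mem_map.mp h with ⟨x, hx, hxe⟩
      rcases List.mem_filter.mp hx with ⟨_, hinv⟩
      cases char_toNat_inj hxe
      simpa using hinv
    · intro h
      refine List.mem_map.mpr ⟨c, List.mem_filter.mpr ⟨?_, by simpa using h⟩, rfl⟩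
      exact (PySem.Set.mem_ofList L c).mpr hm
  by_cases h : pvValidBases.contains c
  · rw [if_neg (fun hmm => (hmem.mp hmm) h), if_pos h]; simp
  · rw [if_pos (hmem.mpr h), if_neg h]

-- the translate pass is the valid-base filter
theorem translate_eq_filter (table : PySem.Dict Nat (Option Char)) (l : List Char)
    (h : ∀ c ∈ l, table.get? c.toNat = if pvValidBases.contains c then none else some none) :
    l.foldr (fun c acc =>
      match table.get? c.toNat with
      | none => c :: acc
      | some none => acc
      | some (some r) => r :: acc) []
    = l.filter (fun b => pvValidBases.contains b) := by
  induction l with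
  | nil => simp
  | cons c t ih =>
    have hc := h c (List.mem_cons_self ..)
    have ht := ih (fun x hx => h x (List.mem_cons_of_mem _ hx))
    by_cases hv : pvValidBases.contains c
    · rw [List.foldr_cons, hc, if_pos hv]
      show c :: _ = _
      rw [ht, List.filter_cons, if_pos (by simpa using hv)]
    · rw [List.foldr_cons, hc, if_neg hv]
      show List.foldr _ _ t = _
      rw [ht, List.filter_cons, if_neg (by simpa using hv)]

-- ===== VERDICT (by name: the statement is the Claim_ definition above) =====
theorem sanitize_dna_spec : Claim_equal_sanitize_dna := by
  intro seq _
  unfold Spec_sanitize_dna sanitize_dna sanitize_dna_alt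
  simp only [sanitize_loop_eq, List.nil_append, zero_add]
  rw [translate_eq_filter _ _ (fun c hc => table_get (PySem.Str.upper seq).toList c hc)]
  refine Prod.ext rfl ?_
  have := length_filter_split (PySem.Str.upper seq).toList
  simp only [PySem.Str.len_eq]
  omega
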